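-- pv_equiv track=rewrite | github.com/GDtoPlay/FrontProto | app/binToAsc.py | binToAsc
-- ===== SOURCE A (Python) =====
-- def binToAsc(InStr):
--     NSTR = ""
--     for InChar in InStr:
--         if int(hex(ord(InChar)), 16) > 126 or int(hex(ord(InChar)), 16) < 64:
--             NSTR = NSTR + " "
--         else:
--             NSTR = NSTR + chr(int(hex(ord(InChar)), 16))
--     return NSTR
-- ===== SOURCE B (Python) =====
-- import re
--
-- def binToAsc(InStr):
--     # Single regex pass: every char outside ASCII 64..126 becomes one space.
--     return re.sub(r'[^\x40-\x7e]', ' ', InStr)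
-- ===== Notes on version B (the rewrite author's own statement) =====
-- stated objective: faster
-- what changed: Replaces the explicit per-character loop with quadratic string concatenation and redundant hex round-trips by a single regular-expression substitution over the whole string.
import Mathlib
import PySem

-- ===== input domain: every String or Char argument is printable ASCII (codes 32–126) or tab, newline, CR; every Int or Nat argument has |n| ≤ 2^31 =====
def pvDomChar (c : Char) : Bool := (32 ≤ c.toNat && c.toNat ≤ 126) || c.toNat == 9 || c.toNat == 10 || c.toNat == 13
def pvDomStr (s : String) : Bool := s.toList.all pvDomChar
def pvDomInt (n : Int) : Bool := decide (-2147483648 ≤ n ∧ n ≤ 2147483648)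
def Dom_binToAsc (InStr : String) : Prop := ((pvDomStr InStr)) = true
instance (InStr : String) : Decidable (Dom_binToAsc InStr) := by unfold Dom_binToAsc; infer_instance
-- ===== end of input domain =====

-- Header: B replaces A's per-character loop (with hex round-trips and string concatenation)
-- by one regex substitution mapping every char outside ASCII 64..126 to a space; idiomatic, same values.


-- ===== PORT A =====
-- loop over chars; int(hex(ord(c)),16) is ord(c); chr of it rebuilt via Char.ofNat
def binToAsc (InStr : String) : String :=
  String.ofList (InStr.toList.foldl
    (fun NSTR InChar =>
      if InChar.toNat > 126 ∨ InChar.toNat < 64 then NSTR ++ [' ']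
      else NSTR ++ [Char.ofNat InChar.toNat]) [])

-- ===== PORT B =====
-- re.sub(r'[^\x40-\x7e]', ' ', InStr): the regex engine rewrites each char not in class 64..126 to ' '
def binToAsc_alt (InStr : String) : String :=
  String.ofList (InStr.toList.map
    (fun c => if 64 ≤ c.toNat && c.toNat ≤ 126 then c else ' '))

-- ===== PRECONDITION & SPEC =====
def Spec_binToAsc (InStr : String) (out : String) : Prop := out = binToAsc_alt InStr
instance (InStr : String) (out : String) : Decidable (Spec_binToAsc InStr out) := by unfold Spec_binToAsc; infer_instance

-- ===== CLAIM (what is proved, stated in full; the proofs are below) =====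
def Claim_equal_binToAsc : Prop := ∀ (InStr : String), Dom_binToAsc InStr → Spec_binToAsc InStr (binToAsc InStr)

-- ===== LEMMAS AND PROOFS =====

theorem binToAsc_fold_eq_map (l : List Char) :
    l.foldl (fun NSTR InChar =>
      if InChar.toNat > 126 ∨ InChar.toNat < 64 then NSTR ++ [' ']
      else NSTR ++ [Char.ofNat InChar.toNat]) [] =
    l.map (fun c => if 64 ≤ c.toNat && c.toNat ≤ 126 then c else ' ') := by
  have h : l.foldl (fun NSTR InChar =>
      if InChar.toNat > 126 ∨ InChar.toNat < 64 then NSTR ++ [' ']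
      else NSTR ++ [Char.ofNat InChar.toNat]) [] =
      l.foldl (fun NSTR InChar =>
        NSTR ++ [if InChar.toNat > 126 ∨ InChar.toNat < 64 then ' '
                 else Char.ofNat InChar.toNat]) [] := by
    congr 1
    funext acc c
    by_cases hc : c.toNat > 126 ∨ c.toNat < 64 <;> simp [hc]
  rw [h, PySem.List.foldl_append_singleton_eq_map]
  simp only [List.nil_append]
  apply List.map_congr_left
  intro c _
  by_cases hc : 64 ≤ c.toNat ∧ c.toNat ≤ 126
  · have : ¬ (c.toNat > 126 ∨ c.toNat < 64) := by omega
    simp [this, hc.1, hc.2, Char.ofNat_toNat]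
  · have h1 : c.toNat > 126 ∨ c.toNat < 64 := by omega
    have h2 : ¬ (64 ≤ c.toNat && c.toNat ≤ 126) = true := by
      simp only [Bool.and_eq_true, decide_eq_true_eq]; omega
    simp [h1, h2]

-- ===== VERDICT (by name: the statement is the Claim_ definition above) =====
theorem binToAsc_spec : Claim_equal_binToAsc := by
  intro InStr _
  unfold Spec_binToAsc binToAsc binToAsc_alt
  rw [binToAsc_fold_eq_map]
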